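-- pv_equiv track=rewrite | github.com/MarcelDeulofeuth19/Cartera_ultima_version | app/services/assignment_service.py | _build_alternating_user_sequence
-- ===== SOURCE A (Python) =====
-- from typing import List, Dict, Set, Any, Optional, Tuple
--
-- def _build_alternating_user_sequence(
--     total: int,
--     quotas: Dict[int, int],
--     first_user: int = 81,
-- ) -> List[int]:
--     """
--     Crea secuencia alternada 81/45 respetando cuotas finales configuradas.
--     """
--     total_int = max(0, int(total))
--     if total_int == 0:
--         return []
--
--     sequence: List[int] = []
--     assigned = {81: 0, 45: 0}
--     next_user = 81 if first_user not in {45, 81} else first_user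
--
--     while len(sequence) < total_int:
--         preferred = next_user
--         alternate = 45 if preferred == 81 else 81
--
--         if assigned[preferred] < int(quotas.get(preferred, 0)):
--             chosen = preferred
--         elif assigned[alternate] < int(quotas.get(alternate, 0)):
--             chosen = alternate
--         else:
--             break
--
--         sequence.append(chosen)
--         assigned[chosen] += 1
--         next_user = alternate
--
--     return sequence
-- ===== SOURCE B (Python) =====
-- def _build_alternating_user_sequence(total, quotas, first_user=81):
--     n = max(0, int(total))
--     start = first_user if first_user in (45, 81) else 81
--     other = 45 if start == 81 else 81
--     qs = max(0, int(quotas.get(start, 0)))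
--     qo = max(0, int(quotas.get(other, 0)))
--     pairs = min(qs, qo)
--     tail_user = start if qs > qo else other
--     seq = [start, other] * pairs + [tail_user] * (qs + qo - 2 * pairs)
--     return seq[:n]
-- ===== Notes on version B (the rewrite author's own statement) =====
-- stated objective: simpler
-- what changed: Replaces the quota-checking simulation loop (per-step assigned-counts dict and preferred/alternate branching) by a closed-form construction: min(qs,qo) alternating pairs followed by a tail of the larger quota's user, truncated to total.
import Mathlib
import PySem

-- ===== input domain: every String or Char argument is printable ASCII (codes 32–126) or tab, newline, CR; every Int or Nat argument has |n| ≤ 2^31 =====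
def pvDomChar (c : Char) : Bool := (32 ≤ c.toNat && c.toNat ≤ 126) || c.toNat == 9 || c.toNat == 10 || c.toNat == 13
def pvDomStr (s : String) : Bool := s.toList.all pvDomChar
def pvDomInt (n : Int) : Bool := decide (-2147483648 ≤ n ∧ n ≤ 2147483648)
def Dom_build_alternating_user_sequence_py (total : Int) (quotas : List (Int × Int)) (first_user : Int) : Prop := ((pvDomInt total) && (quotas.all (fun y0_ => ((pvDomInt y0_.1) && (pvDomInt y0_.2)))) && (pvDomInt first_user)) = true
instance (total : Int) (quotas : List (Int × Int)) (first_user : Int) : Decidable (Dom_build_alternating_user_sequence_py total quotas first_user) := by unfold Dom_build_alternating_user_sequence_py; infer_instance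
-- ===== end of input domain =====

-- B replaces A's quota-checking simulation loop by a closed-form construction (alternating pairs + tail, truncated): objective "simpler".


-- ===== PORT A =====
-- the while loop of A: fuel = total_int - len(sequence) (the loop appends one element per pass)
def pvAloop (quotas : PySem.Dict Int Int) (totalInt : Int) :
    Nat → PySem.Dict Int Int → Int → List Int → List Int
  | 0, _, _, seq => seq
  | f+1, assigned, nextUser, seq =>
    if (seq.length : Int) < totalInt then
      let preferred := nextUser
      let alternate : Int := if preferred == 81 then 45 else 81
      if assigned.getD preferred 0 < quotas.getD preferred 0 then
        pvAloop quotas totalInt f (assigned.modify preferred 0 (· + 1)) alternate (seq ++ [preferred])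
      else if assigned.getD alternate 0 < quotas.getD alternate 0 then
        pvAloop quotas totalInt f (assigned.modify alternate 0 (· + 1)) alternate (seq ++ [alternate])
      else seq
    else seq

def build_alternating_user_sequence_py (total : Int) (quotas : List (Int × Int)) (first_user : Int) : List Int :=
  let totalInt : Int := max 0 total
  if totalInt = 0 then []
  else
    let assigned : PySem.Dict Int Int := PySem.Dict.ofList [(81, 0), (45, 0)]
    let nextUser : Int := if !(first_user == 45 || first_user == 81) then 81 else first_user
    pvAloop (PySem.Dict.mk quotas) totalInt totalInt.toNat assigned nextUser []

-- ===== PORT B =====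
def build_alternating_user_sequence_py_alt (total : Int) (quotas : List (Int × Int)) (first_user : Int) : List Int :=
  let n : Int := max 0 total
  let start : Int := if first_user == 45 || first_user == 81 then first_user else 81
  let other : Int := if start == 81 then 45 else 81
  let qs : Int := max 0 ((PySem.Dict.mk quotas).getD start 0)
  let qo : Int := max 0 ((PySem.Dict.mk quotas).getD other 0)
  let pairs : Int := min qs qo
  let tail_user : Int := if qs > qo then start else other
  let seq : List Int := (List.replicate pairs.toNat [start, other]).flatten ++
    List.replicate (qs + qo - 2 * pairs).toNat tail_user
  seq.take n.toNat

-- ===== PRECONDITION & SPEC =====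
def Spec_build_alternating_user_sequence_py (total : Int) (quotas : List (Int × Int)) (first_user : Int) (out : List Int) : Prop := out = build_alternating_user_sequence_py_alt total quotas first_user
instance (total : Int) (quotas : List (Int × Int)) (first_user : Int) (out : List Int) : Decidable (Spec_build_alternating_user_sequence_py total quotas first_user out) := by unfold Spec_build_alternating_user_sequence_py; infer_instance

-- ===== CLAIM (what is proved, stated in full; the proofs are below) =====
def Claim_equal_build_alternating_user_sequence_py : Prop := ∀ (total : Int) (quotas : List (Int × Int)) (first_user : Int), Dom_build_alternating_user_sequence_py total quotas first_user → Spec_build_alternating_user_sequence_py total quotas first_user (build_alternating_user_sequence_py total quotas first_user)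

-- ===== LEMMAS AND PROOFS =====

-- the abstract sequence A's loop emits, driven by the two remaining quotas (preferred first)
def pvIdeal : Nat → Nat → Int → Int → List Int
  | rp+1, ra, p, a => p :: pvIdeal ra rp a p
  | 0, ra+1, p, a => a :: pvIdeal ra 0 a p
  | 0, 0, _, _ => []
termination_by rp ra => rp + ra
decreasing_by all_goals omega

lemma pvIdeal_deg (n : Nat) : ∀ p a : Int, pvIdeal n 0 p a = List.replicate n p ∧ pvIdeal 0 n p a = List.replicate n a := by
  induction n with
  | zero => intro p a; constructor <;> (rw [pvIdeal]; rfl)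
  | succ k ih =>
    intro p a
    constructor
    · rw [pvIdeal, (ih a p).2]; rfl
    · rw [pvIdeal, (ih a p).1]; rfl

lemma pvIdeal_closed : ∀ (m n : Nat) (p a : Int),
    pvIdeal m n p a = (List.replicate (min m n) [p, a]).flatten ++
      List.replicate (m + n - 2 * min m n) (if n < m then p else a) := by
  intro m
  induction m with
  | zero =>
    intro n p a
    rw [(pvIdeal_deg n p a).2]
    simp
  | succ k ih =>
    intro n p a
    cases n with
    | zero =>
      rw [(pvIdeal_deg (k+1) p a).1]
      simp
    | succ j =>
      rw [pvIdeal, pvIdeal, ih j p a]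
      have hmin : min (k+1) (j+1) = min k j + 1 := by omega
      have harith : (k+1) + (j+1) - 2 * (min k j + 1) = k + j - 2 * min k j := by omega
      have hif : (if j+1 < k+1 then p else a) = (if j < k then p else a) := by
        by_cases h : j < k <;> simp [h]
      rw [hmin, harith, hif, List.replicate_succ, List.flatten_cons]
      simp

lemma pvAloop_eq (quotas : PySem.Dict Int Int) (totalInt : Int) :
    ∀ (fuel : Nat) (assigned : PySem.Dict Int Int) (p a : Int) (seq : List Int),
    ((p, a) = ((81 : Int), (45 : Int)) ∨ (p, a) = ((45 : Int), (81 : Int))) →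
    (seq.length : Int) + fuel = totalInt →
    pvAloop quotas totalInt fuel assigned p seq =
      seq ++ List.take fuel
        (pvIdeal (quotas.getD p 0 - assigned.getD p 0).toNat
                 (quotas.getD a 0 - assigned.getD a 0).toNat p a) := by
  intro fuel
  induction fuel with
  | zero => intro assigned p a seq _ _; simp [pvAloop]
  | succ f ih =>
    intro assigned p a seq hpa hlen
    have hne : p ≠ a := by rcases hpa with h | h <;> (injection h with h1 h2; subst h1; subst h2; decide)
    have halt : (if p == 81 then (45 : Int) else 81) = a := by
      rcases hpa with h | h <;> (injection h with h1 h2; subst h1; subst h2; decide)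
    have hcond : (seq.length : Int) < totalInt := by omega
    rw [pvAloop]
    simp only [halt, if_pos hcond]
    set qp := quotas.getD p 0 with hqp
    set qa := quotas.getD a 0 with hqa
    set ap := assigned.getD p 0 with hap
    set aa := assigned.getD a 0 with haa
    by_cases h1 : ap < qp
    · rw [if_pos h1]
      rw [ih (assigned.modify p 0 (· + 1)) a p (seq ++ [p]) (by rcases hpa with h | h <;> (injection h with h1 h2; subst h1; subst h2) <;> simp) (by simp; omega)]
      rw [PySem.Dict.getD_modify_self, PySem.Dict.getD_modify_of_ne assigned 0 (· + 1) (Ne.symm hne)]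
      have hk : (qp - ap).toNat = (qp - (ap + 1)).toNat + 1 := by omega
      rw [← hqp, ← hqa, ← hap, ← haa, hk]
      simp only [pvIdeal]
      simp
    · rw [if_neg h1]
      by_cases h2 : aa < qa
      · rw [if_pos h2]
        rw [ih (assigned.modify a 0 (· + 1)) a p (seq ++ [a]) (by rcases hpa with h | h <;> (injection h with h1 h2; subst h1; subst h2) <;> simp) (by simp; omega)]
        rw [PySem.Dict.getD_modify_self, PySem.Dict.getD_modify_of_ne assigned 0 (· + 1) hne]
        have hz : (qp - ap).toNat = 0 := by omega
        have hk : (qa - aa).toNat = (qa - (aa + 1)).toNat + 1 := by omega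
        rw [← hqp, ← hqa, ← hap, ← haa, hz, hk]
        simp only [pvIdeal]
        simp
      · rw [if_neg h2]
        have hz1 : (qp - ap).toNat = 0 := by omega
        have hz2 : (qa - aa).toNat = 0 := by omega
        rw [hz1, hz2]
        simp [pvIdeal]

lemma pv_main (total : Int) (quotas : List (Int × Int)) (p a : Int)
    (hpa : (p, a) = ((81 : Int), (45 : Int)) ∨ (p, a) = ((45 : Int), (81 : Int))) :
    pvAloop (PySem.Dict.mk quotas) (max 0 total) (max 0 total).toNat
        (PySem.Dict.ofList [(81, 0), (45, 0)]) p [] =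
      List.take (max 0 total).toNat
        ((List.replicate (min (max 0 ((PySem.Dict.mk quotas).getD p 0))
              (max 0 ((PySem.Dict.mk quotas).getD a 0))).toNat [p, a]).flatten ++
          List.replicate ((max 0 ((PySem.Dict.mk quotas).getD p 0) +
              max 0 ((PySem.Dict.mk quotas).getD a 0) -
              2 * min (max 0 ((PySem.Dict.mk quotas).getD p 0))
                (max 0 ((PySem.Dict.mk quotas).getD a 0))).toNat)
            (if max 0 ((PySem.Dict.mk quotas).getD p 0) > max 0 ((PySem.Dict.mk quotas).getD a 0)
              then p else a)) := by
  have hz : (PySem.Dict.ofList [((81 : Int), (0 : Int)), (45, 0)]).getD p 0 = 0 ∧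
      (PySem.Dict.ofList [((81 : Int), (0 : Int)), (45, 0)]).getD a 0 = 0 := by
    rcases hpa with h | h <;> (injection h with h1 h2; subst h1; subst h2) <;> exact ⟨by decide, by decide⟩
  rw [pvAloop_eq _ _ _ _ p a _ hpa (by simp), hz.1, hz.2]
  set qp := (PySem.Dict.mk quotas).getD p 0 with hqpd
  set qa := (PySem.Dict.mk quotas).getD a 0 with hqad
  rw [Int.sub_zero, Int.sub_zero, pvIdeal_closed]
  have h1 : (min (max 0 qp) (max 0 qa)).toNat = min qp.toNat qa.toNat := by omega
  have h2 : (max 0 qp + max 0 qa - 2 * min (max 0 qp) (max 0 qa)).toNat =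
      qp.toNat + qa.toNat - 2 * min qp.toNat qa.toNat := by omega
  have hif : (if max 0 qp > max 0 qa then p else a) = (if qa.toNat < qp.toNat then p else a) := by
    by_cases h : qa.toNat < qp.toNat
    · rw [if_pos h, if_pos (by omega)]
    · rw [if_neg h, if_neg (by omega)]
  rw [h1, h2, hif]
  simp

-- ===== VERDICT (by name: the statement is the Claim_ definition above) =====
theorem build_alternating_user_sequence_py_spec : Claim_equal_build_alternating_user_sequence_py := by
  intro total quotas first_user _
  unfold Spec_build_alternating_user_sequence_py
  unfold build_alternating_user_sequence_py build_alternating_user_sequence_py_alt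
  by_cases h0 : max 0 total = 0
  · simp [h0]
  · rw [if_neg h0]
    by_cases hb : (first_user == 45 || first_user == 81) = true
    · have : first_user = 45 ∨ first_user = 81 := by
        rcases Bool.or_eq_true_iff.mp hb with h | h
        · exact Or.inl (by exact_mod_cast beq_iff_eq.mp h)
        · exact Or.inr (by exact_mod_cast beq_iff_eq.mp h)
      rcases this with h | h <;> subst h
      · exact pv_main total quotas 45 81 (Or.inr rfl)
      · exact pv_main total quotas 81 45 (Or.inl rfl)
    · have hb' : (first_user == 45 || first_user == 81) = false := by
        simpa using hb
      simp only [hb']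
      exact pv_main total quotas 81 45 (Or.inl rfl)
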